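-- pv_equiv track=rewrite | github.com/wenvit/launch_school_py110 | lesson1/sort_by_most_adjacent_consonant.py | sort_by_consonant_count
-- ===== SOURCE A (Python) =====
-- VOWELS = 'aeiou'
--
-- def is_consonant(char):
--     return char not in VOWELS
--
-- def sort_by_consonant_count(input_list):
--     lists_with_consonant_counts = []
--
--     for string in input_list:
--         consonant_count = 0
--         max_consonant_count = 0
--         string_no_spaces = string.replace(' ', '')
--         last_index = len(string_no_spaces) - 1
--
--         for idx in range(len(string_no_spaces)):
--             if is_consonant(string_no_spaces[idx]):
--                 consonant_count += 1
--             if consonant_count > max_consonant_count: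
--                 max_consonant_count = consonant_count
--             if (idx != last_index) and not is_consonant(string_no_spaces[idx + 1]):
--                 consonant_count = 0
--
--         lists_with_consonant_counts.append([max_consonant_count, string])
--
--     return sorted(lists_with_consonant_counts, reverse=True)
-- ===== SOURCE B (Python) =====
-- VOWELS = 'aeiou'
--
-- def max_runs(chars):
--     # group extraction: skip vowels, measure each maximal consonant run with a second pointer
--     best = 0
--     i = 0
--     n = len(chars)
--     while i < n:
--         if chars[i] in VOWELS:
--             i += 1
--             continue
--         j = i + 1
--         while j < n and chars[j] not in VOWELS:
--             j += 1
--         if j - i > best: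
--             best = j - i
--         i = j
--     return best
--
-- def sort_by_consonant_count(input_list):
--     pairs = [[max_runs(string.replace(' ', '')), string] for string in input_list]
--     return sorted(pairs, reverse=True)
-- ===== Notes on version B (the rewrite author's own statement) =====
-- stated objective: alternative
-- what changed: Per string, a two-pointer group-extraction pass that skips vowels and measures each maximal consonant run directly replaces A's stateful counter with lookahead-based resets, and the pair list is built by a comprehension instead of append in a loop.
import Mathlib
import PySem

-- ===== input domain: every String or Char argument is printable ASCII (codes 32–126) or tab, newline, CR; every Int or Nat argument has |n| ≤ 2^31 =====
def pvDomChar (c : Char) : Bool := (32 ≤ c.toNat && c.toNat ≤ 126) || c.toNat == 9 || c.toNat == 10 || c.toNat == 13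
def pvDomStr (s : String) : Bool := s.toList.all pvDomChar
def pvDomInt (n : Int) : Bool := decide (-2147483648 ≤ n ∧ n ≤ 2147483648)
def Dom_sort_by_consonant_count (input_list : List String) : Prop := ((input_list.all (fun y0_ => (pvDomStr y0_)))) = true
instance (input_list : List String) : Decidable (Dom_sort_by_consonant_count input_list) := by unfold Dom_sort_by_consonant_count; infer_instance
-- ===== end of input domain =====

-- ===== PORT A =====
-- B changes the per-string pass from A's running counter with lookahead resets to a
-- two-pointer extraction of maximal consonant runs (alternative decomposition, same cost).

def is_consonant (char : Char) : Bool := !(("aeiou".toList).contains char)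

-- inner 'for idx in range(len(string_no_spaces))' loop of A, as a fold over the range;
-- indexing uses pyGetD (always in range where A reads)
def sbcc_count (string : String) : Int :=
  let string_no_spaces := (PySem.Str.replace string " " "").toList
  let last_index : Int := (string_no_spaces.length : Int) - 1
  ((PySem.List.pyRange 0 (string_no_spaces.length : Int) 1).foldl
    (fun (st : Int × Int) idx =>
      let consonant_count := if is_consonant (PySem.List.pyGetD string_no_spaces idx ' ') then st.1 + 1 else st.1
      let max_consonant_count := if consonant_count > st.2 then consonant_count else st.2
      let consonant_count :=
        if idx ≠ last_index ∧ ¬ is_consonant (PySem.List.pyGetD string_no_spaces (idx + 1) ' ') then 0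
        else consonant_count
      (consonant_count, max_consonant_count)) ((0 : Int), (0 : Int))).2

def sort_by_consonant_count (input_list : List String) : List (Int × String) :=
  let lists_with_consonant_counts :=
    input_list.foldl (fun acc string => acc ++ [(sbcc_count string, string)]) []
  PySem.List.sorted2 lists_with_consonant_counts Prod.fst Prod.snd true

-- ===== PORT B =====
-- inner while loop of B: advance j over consonants
def b_scan_run (chars : List Char) (j : Nat) : Nat :=
  if h : j < chars.length then
    if !(("aeiou".toList).contains chars[j]) then b_scan_run chars (j + 1) else j
  else j
termination_by chars.length - j

theorem b_scan_run_ge (chars : List Char) (j : Nat) : j ≤ b_scan_run chars j := by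
  unfold b_scan_run
  split
  · split
    · exact Nat.le_trans (Nat.le_succ j) (b_scan_run_ge chars (j + 1))
    · exact Nat.le_refl j
  · exact Nat.le_refl j
termination_by chars.length - j

-- outer while loop of B's max_runs
def b_runs_loop (chars : List Char) (i : Nat) (best : Int) : Int :=
  if h : i < chars.length then
    if (("aeiou".toList).contains chars[i]) then b_runs_loop chars (i + 1) best
    else
      let j := b_scan_run chars (i + 1)
      b_runs_loop chars j (if (j : Int) - (i : Int) > best then (j : Int) - (i : Int) else best)
  else best
termination_by chars.length - i
decreasing_by
  · omega
  · have := b_scan_run_ge chars (i + 1); omega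

def max_runs (chars : List Char) : Int := b_runs_loop chars 0 0

def sort_by_consonant_count_alt (input_list : List String) : List (Int × String) :=
  let pairs := input_list.map (fun string => (max_runs (PySem.Str.replace string " " "").toList, string))
  PySem.List.sorted2 pairs Prod.fst Prod.snd true

-- ===== PRECONDITION & SPEC =====

def Spec_sort_by_consonant_count (input_list : List String) (out : List (Int × String)) : Prop := out = sort_by_consonant_count_alt input_list
instance (input_list : List String) (out : List (Int × String)) : Decidable (Spec_sort_by_consonant_count input_list out) := by unfold Spec_sort_by_consonant_count; infer_instance

-- ===== CLAIM (what is proved, stated in full; the proofs are below) =====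
def Claim_equal_sort_by_consonant_count : Prop := ∀ (input_list : List String), Dom_sort_by_consonant_count input_list → Spec_sort_by_consonant_count input_list (sort_by_consonant_count input_list)

-- ===== LEMMAS AND PROOFS =====

-- the character test shared by both ports, under its B-side spelling
def consB (c : Char) : Bool := !(("aeiou".toList).contains c)

-- length of the leading consonant run
def leadRun : List Char → Nat
  | [] => 0
  | c :: r => if consB c then leadRun r + 1 else 0

-- specification of the per-string value: max over cnt-extended first run and later runs
def S : List Char → Int → Int
  | [], cnt => cnt
  | c :: r, cnt => if consB c then S r (cnt + 1) else max cnt (S r 0)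

-- A's inner loop as a structural recursion (lookahead = head of the remaining tail)
def aRec : List Char → Int → Int → Int
  | [], _, m => m
  | c :: rest, cnt, m =>
    let cnt1 := if consB c then cnt + 1 else cnt
    let m1 := if cnt1 > m then cnt1 else m
    let cnt2 := match rest with
      | [] => cnt1
      | d :: _ => if ¬ consB d then 0 else cnt1
    aRec rest cnt2 m1

theorem S_nonneg (cs : List Char) : ∀ cnt : Int, 0 ≤ cnt → 0 ≤ S cs cnt := by
  induction cs with
  | nil => intro cnt h; simpa [S] using h
  | cons c r ih =>
    intro cnt h
    simp only [S]
    split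
    · exact ih _ (by omega)
    · have := ih 0 le_rfl; omega

theorem S_ge (cs : List Char) : ∀ cnt : Int, cnt ≤ S cs cnt := by
  induction cs with
  | nil => intro cnt; simp [S]
  | cons c r ih =>
    intro cnt
    simp only [S]
    split
    · have := ih (cnt + 1); omega
    · omega

theorem aRec_cons (c : Char) (rest : List Char) (cnt m : Int) :
    aRec (c :: rest) cnt m =
      aRec rest
        (match rest with
          | [] => if consB c = true then cnt + 1 else cnt
          | d :: _ => if ¬ consB d = true then 0 else if consB c = true then cnt + 1 else cnt)
        (if (if consB c = true then cnt + 1 else cnt) > m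
          then (if consB c = true then cnt + 1 else cnt) else m) := rfl

theorem aRec_eq_S (cs : List Char) : ∀ cnt m : Int, 0 ≤ cnt → cnt ≤ m →
    (∀ d rest, cs = d :: rest → consB d = false → cnt = 0) →
    aRec cs cnt m = max m (S cs cnt) := by
  induction cs with
  | nil =>
    intro cnt m h0 hm _
    simp only [aRec, S]; omega
  | cons c rest ih =>
    intro cnt m h0 hm hhead
    rw [aRec_cons]
    by_cases hc : consB c = true
    · -- consonant head
      cases rest with
      | nil =>
        simp only [hc, ite_true, aRec, S]
        omega
      | cons d rest' =>
        by_cases hd : consB d = true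
        · simp only [hc, hd, ite_true, not_true_eq_false, ite_false]
          rw [ih (cnt + 1) (if cnt + 1 > m then cnt + 1 else m) (by omega) (by omega)
            (fun e re he hce => absurd ((List.cons.injEq .. ▸ he).1 ▸ hce) (by simp [hd]))]
          have hS := S_ge rest' (cnt + 1 + 1)
          have h1 : S (c :: d :: rest') cnt = S rest' (cnt + 1 + 1) := by simp [S, hc, hd]
          have h2 : S (d :: rest') (cnt + 1) = S rest' (cnt + 1 + 1) := by simp [S, hd]
          rw [h1, h2]
          omega
        · simp only [hc, ite_true]
          rw [if_pos hd]
          rw [ih 0 (if cnt + 1 > m then cnt + 1 else m) le_rfl (by omega)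
            (fun e re he hce => rfl)]
          have h1 : S (c :: d :: rest') cnt = max (cnt + 1) (S rest' 0) := by
            simp [S, hc, hd]
          have h2 : S (d :: rest') 0 = max 0 (S rest' 0) := by simp [S, hd]
          have hn := S_nonneg rest' 0 le_rfl
          rw [h1, h2]
          omega
    · -- vowel head: cnt = 0
      have hcnt : cnt = 0 := hhead c rest rfl (by simpa using hc)
      subst hcnt
      have hS0 : S (c :: rest) 0 = max 0 (S rest 0) := by simp [S, hc]
      have hn := S_nonneg rest 0 le_rfl
      cases rest with
      | nil =>
        simp only [hc, Bool.false_eq_true, ite_false, aRec]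
        rw [hS0]
        simp only [S]
        omega
      | cons d rest' =>
        simp only [hc, Bool.false_eq_true, ite_false]
        have hm0 : (if (0:Int) > m then (0:Int) else m) = m := by omega
        have hz : (if ¬ consB d = true then (0:Int) else 0) = 0 := by split <;> rfl
        rw [hm0, hz, ih 0 m le_rfl (by omega) (fun e re he hce => rfl)]
        omega

theorem is_consonant_consB (c : Char) : is_consonant c = consB c := rfl

-- A's range-fold equals aRec on the dropped suffix
theorem foldA (cs : List Char) (k : Nat) (st : Int × Int) (hk : k ≤ cs.length) :
    ((PySem.List.pyRange (k : Int) (cs.length : Int) 1).foldl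
      (fun (st : Int × Int) idx =>
        let consonant_count := if is_consonant (PySem.List.pyGetD cs idx ' ') then st.1 + 1 else st.1
        let max_consonant_count := if consonant_count > st.2 then consonant_count else st.2
        let consonant_count :=
          if idx ≠ (cs.length : Int) - 1 ∧ ¬ is_consonant (PySem.List.pyGetD cs (idx + 1) ' ') then 0
          else consonant_count
        (consonant_count, max_consonant_count)) st).2 = aRec (cs.drop k) st.1 st.2 := by
  by_cases h : k < cs.length
  · rw [PySem.List.pyRange_one_cons (by exact_mod_cast h), List.foldl_cons]
    have hcast : ((k : Int) + 1) = ((k + 1 : Nat) : Int) := by push_cast; ring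
    rw [hcast, foldA cs (k + 1) _ (by omega)]
    have hget : PySem.List.pyGetD cs (k : Int) ' ' = cs[k] := by
      rw [PySem.List.pyGetD_natCast, List.getD_eq_getElem cs ' ' h]
    rw [List.drop_eq_getElem_cons h, aRec_cons]
    by_cases hlast : k + 1 = cs.length
    · -- k is the last index: the reset condition is false, and the tail is empty
      have hdrop : cs.drop (k + 1) = [] := by
        rw [List.drop_eq_nil_iff]; omega
      have hkk : ((k : Int)) = ((k + 1 : Nat) : Int) - 1 := by push_cast; ring
      rw [hkk] at hget ⊢
      simp only [hdrop, hget, is_consonant_consB]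
      have hc1' : ¬ (((k + 1 : Nat) : Int) - 1 ≠ (cs.length : Int) - 1 ∧
          ¬ consB (PySem.List.pyGetD cs ((k + 1 : Nat) : Int) ' ') = true) :=
        fun hcon => hcon.1 (by rw [hlast])
      rw [if_neg hc1']
    · -- k is not the last index: the lookahead is cs[k+1]
      have hlt : k + 1 < cs.length := by omega
      have hne : ((k + 1 : Nat) : Int) - 1 ≠ (cs.length : Int) - 1 := by
        intro hcon
        have : k + 1 = cs.length := by
          exact_mod_cast (by omega : ((k + 1 : Nat) : Int) = (cs.length : Int))
        exact hlast this
      have hget2 : PySem.List.pyGetD cs ((k + 1 : Nat) : Int) ' ' = cs[k + 1] := by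
        rw [PySem.List.pyGetD_natCast, List.getD_eq_getElem cs ' ' hlt]
      have hkk : ((k : Int)) = ((k + 1 : Nat) : Int) - 1 := by push_cast; ring
      rw [hkk] at hget ⊢
      rw [List.drop_eq_getElem_cons hlt]
      simp only [hget, is_consonant_consB, ne_eq, hne, not_false_eq_true, true_and]
      rw [hget2]
  · have hk2 : k = cs.length := by omega
    subst hk2
    rw [List.drop_eq_nil_iff.mpr (by omega)]
    have : PySem.List.pyRange (cs.length : Int) (cs.length : Int) 1 = [] := by
      simp [PySem.List.pyRange]
    rw [this, List.foldl_nil]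
    rfl
termination_by cs.length - k

theorem b_scan_run_eq (cs : List Char) (j : Nat) :
    b_scan_run cs j = j + leadRun (cs.drop j) := by
  unfold b_scan_run
  split
  · rename_i h
    rw [List.drop_eq_getElem_cons h]
    split
    · rename_i hc
      rw [b_scan_run_eq cs (j + 1)]
      simp only [leadRun, consB]
      rw [if_pos hc]
      omega
    · rename_i hc
      simp only [leadRun, consB]
      rw [if_neg hc]
      omega
  · rename_i h
    rw [List.drop_eq_nil_of_le (by omega)]
    simp [leadRun]
termination_by cs.length - j

theorem S_run (cs : List Char) : ∀ cnt : Int, 0 ≤ cnt →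
    S cs cnt = max (cnt + leadRun cs) (S (cs.drop (leadRun cs)) 0) := by
  induction cs with
  | nil => intro cnt h; simp [S, leadRun]; omega
  | cons c r ih =>
    intro cnt h
    by_cases hc : consB c = true
    · simp only [S, leadRun, hc, ite_true, List.drop_succ_cons]
      rw [ih (cnt + 1) (by omega)]
      push_cast
      omega
    · have hcf : consB c = false := by simpa using hc
      simp only [S, leadRun, hcf, Bool.false_eq_true, ite_false, List.drop_zero]
      have hn := S_nonneg r 0 le_rfl
      push_cast
      omega

theorem b_runs_loop_eq (cs : List Char) (i : Nat) (best : Int) (hb : 0 ≤ best) :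
    b_runs_loop cs i best = max best (S (cs.drop i) 0) := by
  unfold b_runs_loop
  split
  · rename_i h
    rw [List.drop_eq_getElem_cons h]
    split
    · rename_i hc
      rw [b_runs_loop_eq cs (i + 1) best hb]
      have hcn : consB cs[i] = false := by simp only [consB, hc, Bool.not_true]
      simp only [S, hcn, Bool.false_eq_true, if_false]
      have hn := S_nonneg (cs.drop (i + 1)) 0 le_rfl
      omega
    · rename_i hc
      have hy : ("aeiou".toList.contains cs[i]) = false := by
        revert hc; cases ("aeiou".toList.contains cs[i]) <;> simp
      have hcn : consB cs[i] = true := by simp only [consB, hy, Bool.not_false]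
      have hscan := b_scan_run_eq cs (i + 1)
      have hge : i + 1 ≤ b_scan_run cs (i + 1) := b_scan_run_ge cs (i + 1)
      rw [b_runs_loop_eq cs (b_scan_run cs (i + 1)) _ (by split <;> omega)]
      simp only [S, hcn, if_pos]
      rw [S_run (cs.drop (i + 1)) (0 + 1) (by omega)]
      have hdd : (cs.drop (i + 1)).drop (leadRun (cs.drop (i + 1))) =
          cs.drop (b_scan_run cs (i + 1)) := by
        rw [List.drop_drop, hscan]
      rw [hdd]
      have hn := S_nonneg (cs.drop (b_scan_run cs (i + 1))) 0 le_rfl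
      set L := (leadRun (cs.drop (i + 1)) : Int)
      have hL : 0 ≤ L := by positivity
      have hj : (b_scan_run cs (i + 1) : Int) = (i : Int) + 1 + L := by
        rw [hscan]; push_cast; ring
      rw [hj]
      split <;> omega
  · rename_i h
    rw [List.drop_eq_nil_of_le (by omega)]
    simp [S]
    omega
termination_by cs.length - i
decreasing_by
  · omega
  · have := b_scan_run_ge cs (i + 1); omega

set_option maxHeartbeats 1000000 in
theorem count_eq (s : String) :
    sbcc_count s = max_runs (PySem.Str.replace s " " "").toList := by
  have hA : sbcc_count s = aRec (PySem.Str.replace s " " "").toList 0 0 := by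
    unfold sbcc_count
    simpa using foldA (PySem.Str.replace s " " "").toList 0 (0, 0) (Nat.zero_le _)
  have hB : max_runs (PySem.Str.replace s " " "").toList =
      max 0 (S (PySem.Str.replace s " " "").toList 0) :=
    b_runs_loop_eq _ 0 0 le_rfl
  rw [hA, hB, aRec_eq_S _ 0 0 le_rfl le_rfl (fun d rest he hce => rfl)]


-- ===== VERDICT (by name: the statement is the Claim_ definition above) =====
theorem sort_by_consonant_count_spec : Claim_equal_sort_by_consonant_count := by
  intro input_list _
  unfold Spec_sort_by_consonant_count sort_by_consonant_count sort_by_consonant_count_alt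
  have hl : input_list.foldl (fun acc string => acc ++ [(sbcc_count string, string)])
      ([] : List (Int × String)) =
      input_list.map (fun string => (max_runs (PySem.Str.replace string " " "").toList, string)) := by
    rw [PySem.List.foldl_append_singleton_eq_map]
    exact List.map_congr_left (fun s _ => by rw [count_eq s])
  rw [hl]
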